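-- pv_equiv track=rewrite | github.com/drawbu/Cours | TD_machine_3/optimize_spaces_in_text.py | aligner_gauche_glouton
-- ===== SOURCE A (Python) =====
-- def aligner_gauche_glouton(text: list[str], n: int, wpl: int) -> int:
--     result = 0
--     line = wpl - len(text[0])
--     for i in range(1, n):
--         if line - len(text[i]) < 1:
--             result += line ** 3
--             line = wpl
--         else:
--             line -= 1
--         line -= len(text[i])
--     return result
-- ===== SOURCE B (Python) =====
-- def aligner_gauche_glouton(text: list[str], n: int, wpl: int) -> int:
--     # Words as a reversed stack: pop() gives words in order in O(1).
--     stack = ([len(text[0])] + [len(text[i]) for i in range(1, n)])[::-1]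
--     total = 0
--     while stack:
--         # Outer loop: one line per iteration, opened by the popped word.
--         line = wpl - stack.pop()
--         # Inner loop: pack following words while they fit.
--         while stack and line - stack[-1] >= 1:
--             line -= 1 + stack.pop()
--         if not stack:
--             return total  # the final line is never charged
--         total += line ** 3
--     return total
-- ===== Notes on version B (the rewrite author's own statement) =====
-- stated objective: alternative
-- what changed: B replaces A's single flat index loop (one accumulator mixing filling and charging per word) with a nested two-level loop over a reversed word-length stack: the outer loop opens one line per iteration, an inner loop pops following words while they fit, and the closed line's leftover is cubed and charged when the next word does not fit; the final line returns uncharged.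
import Mathlib
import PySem

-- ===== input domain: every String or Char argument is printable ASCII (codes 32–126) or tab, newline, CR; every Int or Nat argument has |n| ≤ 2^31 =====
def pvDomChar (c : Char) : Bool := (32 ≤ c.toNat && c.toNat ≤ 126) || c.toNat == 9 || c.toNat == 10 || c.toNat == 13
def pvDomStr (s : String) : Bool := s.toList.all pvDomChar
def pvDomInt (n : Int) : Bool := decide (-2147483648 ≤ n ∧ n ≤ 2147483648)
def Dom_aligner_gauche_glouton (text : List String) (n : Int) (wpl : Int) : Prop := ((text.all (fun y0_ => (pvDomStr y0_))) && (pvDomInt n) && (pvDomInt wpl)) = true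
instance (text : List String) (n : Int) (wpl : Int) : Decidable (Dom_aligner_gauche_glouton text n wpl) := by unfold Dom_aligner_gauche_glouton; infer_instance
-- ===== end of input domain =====

-- B restructures A's single flat loop into a nested two-level loop (outer: one line per
-- iteration, inner: pack words while they fit, words popped from a reversed stack);
-- same values, different decomposition (objective: alternative).

-- ===== PORT A =====
def aligner_gauche_glouton (text : List String) (n : Int) (wpl : Int) : Int :=
  let line0 : Int := wpl - ((PySem.List.pyGetD text 0 "").length : Int)
  let st := (PySem.List.pyRange 1 n 1).foldl (fun (st : Int × Int) (i : Int) =>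
      let w : Int := ((PySem.List.pyGetD text i "").length : Int)
      if st.2 - w < 1 then (st.1 + st.2 ^ 3, wpl - w)
      else (st.1, st.2 - 1 - w)) (0, line0)
  st.1

-- ===== PORT B =====
-- Source B's inner `while stack and line - stack[-1] >= 1: line -= 1 + stack.pop()`:
-- the reversed python stack is kept here as a list in word order, pop = head.
def pvFill (line : Int) : List Int → Int × List Int
  | [] => (line, [])
  | w :: rest => if line - w < 1 then (line, w :: rest) else pvFill (line - 1 - w) rest

theorem pvFill_len (line : Int) (ws : List Int) : (pvFill line ws).2.length ≤ ws.length := by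
  induction ws generalizing line with
  | nil => simp [pvFill]
  | cons w rest ih =>
      simp only [pvFill]
      split
      · simp
      · exact le_trans (ih _) (Nat.le_succ _)

-- Source B's outer `while stack:` loop with accumulator `total`.
def pvLines (wpl : Int) (total : Int) : List Int → Int
  | [] => total
  | w :: rest =>
      let p := pvFill (wpl - w) rest
      if p.2 = [] then total
      else pvLines wpl (total + p.1 ^ 3) p.2
termination_by ws => ws.length
decreasing_by
  have := pvFill_len (wpl - w) rest
  simp_all only [List.length_cons]
  omega

def aligner_gauche_glouton_alt (text : List String) (n : Int) (wpl : Int) : Int :=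
  let ws : List Int := ((PySem.List.pyGetD text 0 "").length : Int) ::
      (PySem.List.pyRange 1 n 1).map (fun i => ((PySem.List.pyGetD text i "").length : Int))
  pvLines wpl 0 ws

-- ===== PRECONDITION & SPEC =====
-- Pre_ excludes exactly the inputs on which A raises IndexError: empty text (text[0]) or n beyond len(text).
def Pre_aligner_gauche_glouton (text : List String) (n : Int) (wpl : Int) : Prop :=
  text ≠ [] ∧ n ≤ (text.length : Int)
instance (text : List String) (n : Int) (wpl : Int) : Decidable (Pre_aligner_gauche_glouton text n wpl) := by
  unfold Pre_aligner_gauche_glouton; infer_instance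
def pvWitness_aligner_gauche_glouton : List String × Int × Int := (["ab", "c", "de"], 3, 5)
def Spec_aligner_gauche_glouton (text : List String) (n : Int) (wpl : Int) (out : Int) : Prop := out = aligner_gauche_glouton_alt text n wpl
instance (text : List String) (n : Int) (wpl : Int) (out : Int) : Decidable (Spec_aligner_gauche_glouton text n wpl out) := by unfold Spec_aligner_gauche_glouton; infer_instance

-- ===== CLAIM (what is proved, stated in full; the proofs are below) =====
def Claim_equal_aligner_gauche_glouton : Prop := ∀ (text : List String) (n : Int) (wpl : Int), Dom_aligner_gauche_glouton text n wpl → Pre_aligner_gauche_glouton text n wpl → Spec_aligner_gauche_glouton text n wpl (aligner_gauche_glouton text n wpl)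

-- ===== LEMMAS AND PROOFS =====
theorem pvFold_lines (text : List String) (wpl : Int) (idxs : List Int) :
    ∀ (acc line : Int),
    (idxs.foldl (fun (st : Int × Int) (i : Int) =>
        let w : Int := ((PySem.List.pyGetD text i "").length : Int)
        if st.2 - w < 1 then (st.1 + st.2 ^ 3, wpl - w)
        else (st.1, st.2 - 1 - w)) (acc, line)).1
    = (if (pvFill line (idxs.map (fun i => ((PySem.List.pyGetD text i "").length : Int)))).2 = [] then acc
       else pvLines wpl
            (acc + (pvFill line (idxs.map (fun i => ((PySem.List.pyGetD text i "").length : Int)))).1 ^ 3)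
            (pvFill line (idxs.map (fun i => ((PySem.List.pyGetD text i "").length : Int)))).2) := by
  induction idxs with
  | nil => intro acc line; simp [pvFill]
  | cons i rest ih =>
      intro acc line
      by_cases h : line - ((PySem.List.pyGetD text i "").length : Int) < 1
      · simp only [List.foldl, List.map, if_pos h, ih, pvFill]
        rw [pvLines]
        simp
      · simp only [List.foldl, List.map, if_neg h, ih, pvFill]

-- ===== VERDICT (by name: the statement is the Claim_ definition above) =====
theorem aligner_gauche_glouton_spec : Claim_equal_aligner_gauche_glouton := by
  intro text n wpl _ _
  unfold Spec_aligner_gauche_glouton aligner_gauche_glouton aligner_gauche_glouton_alt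
  rw [pvFold_lines]
  rw [pvLines]
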